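-- pv_equiv track=rewrite | github.com/YotamAlon/Shift-Scheduler | schedule/schedule_file_input.py | shift_list_to_dictionary
-- ===== SOURCE A (Python) =====
-- def shift_list_to_dictionary(shift_list):
--     shift_d = {}
--     for shift in shift_list:
--         day_and_shift = shift_to_string(shift[0:2])
--         if day_and_shift not in shift_d:
--             shift_d[day_and_shift] = shift[2]
--         else:
--             shift_d[day_and_shift] = max(shift_d[day_and_shift], shift[2])
--     return shift_d
--
-- def shift_to_string(shift):
--     string_representation = 'd' + str(shift[0]) + 's' + str(shift[1])
--     return string_representation
-- ===== SOURCE B (Python) =====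
-- def shift_list_to_dictionary(shift_list):
--     groups = {}
--     for shift in shift_list:
--         key = shift_to_string(shift[0:2])
--         groups.setdefault(key, []).append(shift[2])
--     return {key: max(values) for key, values in groups.items()}
--
-- def shift_to_string(shift):
--     string_representation = 'd' + str(shift[0]) + 's' + str(shift[1])
--     return string_representation
-- ===== Notes on version B (the rewrite author's own statement) =====
-- stated objective: alternative
-- what changed: B groups all third-components per string key into lists in one pass and reduces each list with max in a second pass, instead of A's online running-max update per insertion.
import Mathlib
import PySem

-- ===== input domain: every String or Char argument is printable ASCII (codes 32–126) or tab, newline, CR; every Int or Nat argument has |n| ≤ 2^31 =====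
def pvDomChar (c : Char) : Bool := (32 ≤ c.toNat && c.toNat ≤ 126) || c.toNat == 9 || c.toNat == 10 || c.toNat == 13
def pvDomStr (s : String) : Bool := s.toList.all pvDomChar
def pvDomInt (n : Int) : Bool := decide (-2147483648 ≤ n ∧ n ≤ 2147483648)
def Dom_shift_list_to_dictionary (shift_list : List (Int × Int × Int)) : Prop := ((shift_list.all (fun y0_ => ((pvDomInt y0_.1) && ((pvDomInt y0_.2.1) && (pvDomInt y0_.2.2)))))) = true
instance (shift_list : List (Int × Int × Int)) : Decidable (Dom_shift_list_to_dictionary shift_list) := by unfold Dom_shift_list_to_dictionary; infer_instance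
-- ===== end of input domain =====

-- B groups the third components per string key into lists in one pass and takes each list's max
-- in a second pass, instead of A's running-max update at each insertion (objective: alternative).

-- ===== PORT A =====
-- helper shift_to_string (shared verbatim by A and B, as in the Python sources)
def shift_to_string (shift : Int × Int) : String :=
  "d" ++ PySem.Int.toStr shift.1 ++ "s" ++ PySem.Int.toStr shift.2

def shift_list_to_dictionary (shift_list : List (Int × Int × Int)) : List (String × Int) :=
  (shift_list.foldl (fun shift_d shift =>
      let day_and_shift := shift_to_string (shift.1, shift.2.1)
      match shift_d.get? day_and_shift with       -- 'day_and_shift not in shift_d' = get? is none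
      | none => shift_d.insert day_and_shift shift.2.2
      | some w => shift_d.insert day_and_shift (max w shift.2.2))
    PySem.Dict.empty).items

-- ===== PORT B =====
def shift_list_to_dictionary_alt (shift_list : List (Int × Int × Int)) : List (String × Int) :=
  let groups : PySem.Dict String (List Int) :=
    shift_list.foldl (fun groups shift =>
      groups.modify (shift_to_string (shift.1, shift.2.1)) [] (· ++ [shift.2.2]))
    PySem.Dict.empty
  -- max(values): each grouped list is nonempty, so the .getD 0 default is never used
  groups.items.map (fun p => (p.1, (PySem.List.max? p.2 (fun y => y)).getD 0))

-- ===== PRECONDITION & SPEC =====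
def Spec_shift_list_to_dictionary (shift_list : List (Int × Int × Int)) (out : List (String × Int)) : Prop := out = shift_list_to_dictionary_alt shift_list
instance (shift_list : List (Int × Int × Int)) (out : List (String × Int)) : Decidable (Spec_shift_list_to_dictionary shift_list out) := by unfold Spec_shift_list_to_dictionary; infer_instance

-- ===== CLAIM (what is proved, stated in full; the proofs are below) =====
def Claim_equal_shift_list_to_dictionary : Prop := ∀ (shift_list : List (Int × Int × Int)), Dom_shift_list_to_dictionary shift_list → Spec_shift_list_to_dictionary shift_list (shift_list_to_dictionary shift_list)

-- ===== LEMMAS AND PROOFS =====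

-- A's loop body written as a single insert (both branches insert at the same key)
lemma stepA_eq (d : PySem.Dict String Int) (s : Int × Int × Int) :
    (let day_and_shift := shift_to_string (s.1, s.2.1)
     match d.get? day_and_shift with
     | none => d.insert day_and_shift s.2.2
     | some w => d.insert day_and_shift (max w s.2.2))
    = d.insert (shift_to_string (s.1, s.2.1))
        (match d.get? (shift_to_string (s.1, s.2.1)) with
         | none => s.2.2
         | some w => max w s.2.2) := by
  cases h : d.get? (shift_to_string (s.1, s.2.1)) <;> simp only [h]

-- the lookup after A's loop is a max-fold over the values whose key matches
lemma getA (l : List (Int × Int × Int)) (d : PySem.Dict String Int) (k : String) :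
    (l.foldl (fun d s => d.insert (shift_to_string (s.1, s.2.1))
        (match d.get? (shift_to_string (s.1, s.2.1)) with
         | none => s.2.2
         | some w => max w s.2.2)) d).get? k
    = ((l.filter (fun s => shift_to_string (s.1, s.2.1) == k)).map (·.2.2)).foldl
        (fun o v => some (match o with | none => v | some w => max w v)) (d.get? k) := by
  induction l generalizing d with
  | nil => simp
  | cons s t ih =>
    simp only [List.foldl_cons, List.filter_cons]
    by_cases hk : shift_to_string (s.1, s.2.1) = k
    · subst hk
      simp only [beq_self_eq_true, if_pos, List.map_cons, List.foldl_cons, ih,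
        PySem.Dict.get?_insert_self]
    · have hb : (shift_to_string (s.1, s.2.1) == k) = false := by simp [hk]
      simp only [hb, Bool.false_eq_true, if_false, ih,
        PySem.Dict.get?_insert_of_ne _ _ (Ne.symm hk)]

-- the max-fold with a `some` accumulator is a plain running max
lemma maxfold_some (t : List Int) (w : Int) :
    t.foldl (fun o v => some (match o with | none => v | some w => max w v)) (some w)
    = some (t.foldl max w) := by
  induction t generalizing w with
  | nil => rfl
  | cons v t ih => simp only [List.foldl_cons, ih]

-- ===== VERDICT (by name: the statement is the Claim_ definition above) =====
theorem shift_list_to_dictionary_spec : Claim_equal_shift_list_to_dictionary := by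
  intro sl _
  unfold Spec_shift_list_to_dictionary shift_list_to_dictionary shift_list_to_dictionary_alt
  -- rewrite A's loop body into single-insert form
  have hA : (sl.foldl (fun shift_d shift =>
      let day_and_shift := shift_to_string (shift.1, shift.2.1)
      match shift_d.get? day_and_shift with
      | none => shift_d.insert day_and_shift shift.2.2
      | some w => shift_d.insert day_and_shift (max w shift.2.2))
      (PySem.Dict.empty : PySem.Dict String Int))
      = sl.foldl (fun d s => d.insert (shift_to_string (s.1, s.2.1))
          (match d.get? (shift_to_string (s.1, s.2.1)) with
           | none => s.2.2
           | some w => max w s.2.2)) PySem.Dict.empty := by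
    congr 1
    funext d s
    exact stepA_eq d s
  rw [hA]
  set key : Int × Int × Int → String := fun s => shift_to_string (s.1, s.2.1) with hkey
  set dA := sl.foldl (fun d s => d.insert (key s)
      (match d.get? (key s) with | none => s.2.2 | some w => max w s.2.2))
      (PySem.Dict.empty : PySem.Dict String Int) with hdA
  set dB := sl.foldl (fun d s => d.modify (key s) [] (· ++ [s.2.2]))
      (PySem.Dict.empty : PySem.Dict String (List Int)) with hdB
  -- both dicts have the same (nodup) key list
  have hkA : dA.keys = PySem.Set.update (PySem.Dict.empty : PySem.Dict String Int).keys (sl.map key) := by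
    rw [hdA]; exact PySem.Dict.keys_foldl_insert_key sl key _ _
  have hkB : dB.keys = PySem.Set.update (PySem.Dict.empty : PySem.Dict String (List Int)).keys (sl.map key) := by
    rw [hdB]; exact PySem.Dict.keys_foldl_modify_key sl key [] _ _
  have hndA : dA.keys.Nodup := by
    rw [hdA]; exact PySem.Dict.nodup_keys_foldl_insert_key sl key _ _ (by simp)
  have hndB : dB.keys.Nodup := by
    rw [hdB]; exact PySem.Dict.nodup_keys_foldl_modify_key sl key [] _ _ (by simp)
  -- the per-key value lists in B
  have hvB : ∀ k, dB.getD k [] = (sl.filter (fun s => key s == k)).map (·.2.2) := by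
    intro k
    have h1 : dB = (sl.map (fun s => (key s, s.2.2))).foldl
        (fun d p => d.modify p.1 [] (· ++ [p.2])) PySem.Dict.empty := by
      rw [hdB, List.foldl_map]
    rw [h1, PySem.Dict.getD_foldl_modify_append]
    simp [List.filter_map, Function.comp_def]
  -- A's per-key value equals max of B's list
  have hval : ∀ k, dA.getD k 0 = (PySem.List.max? (dB.getD k []) (fun y => y)).getD 0 := by
    intro k
    have h1 := getA sl PySem.Dict.empty k
    rw [← hdA] at h1
    rw [PySem.Dict.getD_eq_get?_getD, h1, hvB k]
    simp only [PySem.Dict.get?_empty, hkey]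
    cases hvs : (sl.filter (fun s => shift_to_string (s.1, s.2.1) == k)).map (·.2.2) with
    | nil => rfl
    | cons x t =>
      rw [List.foldl_cons, PySem.List.max?_id_cons]
      simp only [maxfold_some, Option.getD_some]
  show dA.items = List.map (fun p => (p.1, (PySem.List.max? p.2 fun y => y).getD 0)) dB.items
  rw [PySem.Dict.items_eq_map_keys dA hndA 0, PySem.Dict.items_eq_map_keys dB hndB [],
    List.map_map, hkA, hkB]
  simp only [PySem.Dict.keys_empty]
  apply List.map_congr_left
  intro k _
  simp only [Function.comp_apply, hval k]
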